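-- pv_equiv track=rewrite | github.com/BenzoXdev/PHP-Obfusc | PHP-Obfusc.py | _obfuscate_php_strings
-- ===== SOURCE A (Python) =====
-- def _encode_string_octal(s):
--     return ''.join(f'\\{ord(c):03o}' for c in s)
--
-- def _encode_string_hex(s):
--     return ''.join(f'\\x{ord(c):02x}' for c in s)
--
-- def _obfuscate_php_strings(code, mode='octal'):
--     encode = _encode_string_octal if mode == 'octal' else _encode_string_hex
--     result = []; i = 0; length = len(code); in_single = False
--     while i < length:
--         c = code[i]
--         if c == "'" and not in_single:
--             in_single = True; result.append(c); i += 1; continue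
--         if c == "'" and in_single:
--             in_single = False; result.append(c); i += 1; continue
--         if in_single:
--             result.append(c); i += 1; continue
--         if c == '"':
--             i += 1; content = []
--             while i < length:
--                 ch = code[i]
--                 if ch == '\\' and i + 1 < length:
--                     content.append(ch); content.append(code[i + 1]); i += 2; continue
--                 if ch == '"':
--                     i += 1; break
--                 content.append(ch); i += 1
--             inner = ''.join(content)
--             if '$' not in inner and len(inner) > 0:
--                 result.append(f'"{encode(inner)}"')
--             else:
--                 result.append(f'"{inner}"')
--             continue
--         result.append(c); i += 1
--     return ''.join(result)
-- ===== SOURCE B (Python) =====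
-- def _split_double(s):
--     idx = 0
--     n = len(s)
--     while idx < n:
--         if s[idx] == '"':
--             return s[:idx], s[idx + 1:]
--         if s[idx] == '\\' and idx + 1 < n:
--             idx += 2
--         else:
--             idx += 1
--     return s, ''
--
-- def _obfuscate_php_strings(code, mode='octal'):
--     if mode == 'octal':
--         encode = lambda s: ''.join('\\%03o' % ord(c) for c in s)
--     else:
--         encode = lambda s: ''.join('\\x%02x' % ord(c) for c in s)
--     parts = []
--     rest = code
--     while rest:
--         i1 = rest.find("'")
--         i2 = rest.find('"')
--         i = i1 if i2 < 0 else (i2 if i1 < 0 else min(i1, i2))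
--         if i < 0:
--             parts.append(rest)
--             break
--         parts.append(rest[:i])
--         q, rest = rest[i], rest[i + 1:]
--         if q == "'":
--             j = rest.find("'")
--             if j < 0:
--                 parts.append("'" + rest)
--                 rest = ''
--             else:
--                 parts.append("'" + rest[:j] + "'")
--                 rest = rest[j + 1:]
--         else:
--             inner, rest = _split_double(rest)
--             if '$' not in inner and inner:
--                 parts.append('"' + encode(inner) + '"')
--             else:
--                 parts.append('"' + inner + '"')
--     return ''.join(parts)
-- ===== Notes on version B (the rewrite author's own statement) =====
-- stated objective: faster
-- what changed: Replaces A's char-by-char state machine with an in_single flag by a chunk-based scan that jumps to the next quote with str.find and consumes each quoted literal wholesale per iteration.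
import Mathlib
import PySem

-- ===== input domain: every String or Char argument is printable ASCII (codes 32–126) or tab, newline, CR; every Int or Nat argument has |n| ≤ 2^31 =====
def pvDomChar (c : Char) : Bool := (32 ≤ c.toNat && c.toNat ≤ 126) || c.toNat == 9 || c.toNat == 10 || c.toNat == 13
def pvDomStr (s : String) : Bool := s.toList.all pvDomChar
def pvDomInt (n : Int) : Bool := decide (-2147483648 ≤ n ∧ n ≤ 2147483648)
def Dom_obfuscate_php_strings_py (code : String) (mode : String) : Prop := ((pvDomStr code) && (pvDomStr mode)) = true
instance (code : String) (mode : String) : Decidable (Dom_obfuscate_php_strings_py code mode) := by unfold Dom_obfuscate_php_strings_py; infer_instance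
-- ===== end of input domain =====

-- B replaces A's char-by-char state machine (in_single flag) with a chunk-based scan that
-- jumps to the next quote with find and consumes each quoted literal wholesale (objective: alternative).

-- ===== PORT A =====
-- shared encoders: `f'\\{ord(c):03o}'` / `f'\\x{ord(c):02x}'`; exact for the domain's chars (code < 512 resp. < 256)
def pvDigitOct (n : Nat) : Char := Char.ofNat (48 + n)
def pvDigitHex (n : Nat) : Char := if n < 10 then Char.ofNat (48 + n) else Char.ofNat (87 + n)
def pvEncOct (s : List Char) : List Char :=
  s.flatMap fun c => ['\\', pvDigitOct (c.toNat / 64), pvDigitOct (c.toNat / 8 % 8), pvDigitOct (c.toNat % 8)]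
def pvEncHex (s : List Char) : List Char :=
  s.flatMap fun c => ['\\', 'x', pvDigitHex (c.toNat / 16), pvDigitHex (c.toNat % 16)]

-- A's inner while loop collecting a double-quoted string's content: returns (content, rest-of-code)
def pvADq : List Char → List Char × List Char
  | [] => ([], [])
  | '\\' :: r1 :: r2 => let p := pvADq r2; ('\\' :: r1 :: p.1, p.2)
  | ch :: rest => if ch = '"' then ([], rest) else let p := pvADq rest; (ch :: p.1, p.2)

-- needed by pvALoop's termination proof
theorem pvADq_snd_le : ∀ cs : List Char, (pvADq cs).2.length ≤ cs.length := by
  intro cs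
  induction cs using pvADq.induct with
  | case1 => simp [pvADq]
  | case2 r1 r2 ih => simp [pvADq]; omega
  | case3 rest h => simp [pvADq]
  | case4 ch rest h1 h2 ih =>
      have he : pvADq (ch :: rest) = (ch :: (pvADq rest).1, (pvADq rest).2) := by
        cases rest with
        | nil => simp [pvADq, h2]
        | cons a b =>
            have : ch ≠ '\\' := fun hc => h1 a b hc rfl
            simp [pvADq, h2, this]
      rw [he]
      simpa using Nat.le_succ_of_le ih

-- A's outer while loop, index i replaced by the remaining list, same branches in the same order
def pvALoop (enc : List Char → List Char) : List Char → Bool → List Char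
  | [], _ => []
  | c :: rest, in_single =>
    if c = '\'' ∧ in_single = false then c :: pvALoop enc rest true
    else if c = '\'' ∧ in_single = true then c :: pvALoop enc rest false
    else if in_single = true then c :: pvALoop enc rest in_single
    else if c = '"' then
      let p := pvADq rest
      (if p.1.contains '$' = false ∧ 0 < p.1.length then '"' :: enc p.1 ++ ['"']
       else '"' :: p.1 ++ ['"']) ++ pvALoop enc p.2 in_single
    else c :: pvALoop enc rest in_single
termination_by cs _ => cs.length
decreasing_by
  all_goals simp
  all_goals first
    | omega
    | (have := pvADq_snd_le rest; omega)

def obfuscate_php_strings_py (code : String) (mode : String) : String :=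
  let encode := if mode = "octal" then pvEncOct else pvEncHex
  String.mk (pvALoop encode code.toList false)

-- ===== PORT B =====
-- B's _split_double: content of a double-quoted literal and the remainder after its closing quote
def pvBSplitDouble : List Char → List Char × List Char
  | [] => ([], [])
  | ch :: rest =>
    if ch = '"' then ([], rest)
    else if ch = '\\' then
      match rest with
      | r1 :: r2 => let p := pvBSplitDouble r2; (ch :: r1 :: p.1, p.2)
      | [] => ([ch], [])
    else let p := pvBSplitDouble rest; (ch :: p.1, p.2)

-- needed by pvBLoop's termination proof
theorem pvBSplitDouble_snd_le : ∀ cs : List Char, (pvBSplitDouble cs).2.length ≤ cs.length := by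
  intro cs
  induction cs using pvBSplitDouble.induct with
  | case1 => simp [pvBSplitDouble]
  | case2 rest => rw [pvBSplitDouble.eq_def]; simp
  | case3 r1 r2 h ih => simp [pvBSplitDouble]; omega
  | case4 h => simp [pvBSplitDouble]
  | case5 ch rest h1 h2 ih =>
      rw [pvBSplitDouble.eq_def]
      simp [h1, h2]
      omega

-- B's `i1 = rest.find("'"); i2 = rest.find('"'); i = …` combination of the two finds
def pvFindQuote (s : List Char) : Option Nat :=
  match s.findIdx? (· = '\''), s.findIdx? (· = '"') with
  | none, none => none
  | some a, none => some a
  | none, some b => some b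
  | some a, some b => some (min a b)

-- B's while loop over the remaining code, one quoted literal per step
def pvBLoop (enc : List Char → List Char) : List Char → List Char
  | [] => []
  | c :: t =>
    match pvFindQuote (c :: t) with
    | none => c :: t
    | some i =>
      let pre := (c :: t).take i
      let rest := (c :: t).drop (i + 1)
      if (c :: t).getD i ' ' = '\'' then
        match rest.findIdx? (· = '\'') with
        | none => pre ++ '\'' :: rest
        | some j => pre ++ '\'' :: rest.take j ++ '\'' :: pvBLoop enc (rest.drop (j + 1))
      else
        let p := pvBSplitDouble rest
        pre ++ (if p.1.contains '$' = false ∧ p.1 ≠ [] then '"' :: enc p.1 ++ ['"']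
                else '"' :: p.1 ++ ['"']) ++ pvBLoop enc p.2
termination_by s => s.length
decreasing_by
  · simp
  · have := pvBSplitDouble_snd_le ((c :: t).drop (i + 1))
    simp at this ⊢
    omega

def obfuscate_php_strings_py_alt (code : String) (mode : String) : String :=
  let encode := if mode = "octal" then pvEncOct else pvEncHex
  String.mk (pvBLoop encode code.toList)

-- ===== PRECONDITION & SPEC =====
def Spec_obfuscate_php_strings_py (code : String) (mode : String) (out : String) : Prop := out = obfuscate_php_strings_py_alt code mode
instance (code : String) (mode : String) (out : String) : Decidable (Spec_obfuscate_php_strings_py code mode out) := by unfold Spec_obfuscate_php_strings_py; infer_instance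

-- ===== CLAIM (what is proved, stated in full; the proofs are below) =====
def Claim_equal_obfuscate_php_strings_py : Prop := ∀ (code : String) (mode : String), Dom_obfuscate_php_strings_py code mode → Spec_obfuscate_php_strings_py code mode (obfuscate_php_strings_py code mode)

-- ===== LEMMAS AND PROOFS =====

-- B's split_double computes the same pair as A's inner loop
theorem pvBSplitDouble_eq_pvADq : ∀ cs : List Char, pvBSplitDouble cs = pvADq cs := by
  intro cs
  induction cs using pvBSplitDouble.induct with
  | case1 => rfl
  | case2 rest => rw [pvBSplitDouble.eq_def]; simp [pvADq]
  | case3 r1 r2 h ih => simp [pvBSplitDouble, pvADq, ih]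
  | case4 h => simp [pvBSplitDouble, pvADq]
  | case5 ch rest h1 h2 ih =>
      have hA : pvADq (ch :: rest) = (ch :: (pvADq rest).1, (pvADq rest).2) := by
        cases rest with
        | nil => simp [pvADq, h1]
        | cons a b => simp [pvADq, h1, h2]
      rw [pvBSplitDouble.eq_def, hA]
      simp [h1, h2, ih]

theorem pvFindQuote_cons (c : Char) (t : List Char) :
    pvFindQuote (c :: t) = if c = '\'' ∨ c = '"' then some 0 else (pvFindQuote t).map (· + 1) := by
  unfold pvFindQuote
  rw [List.findIdx?_cons, List.findIdx?_cons]
  by_cases h1 : c = '\''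
  · have h2 : c ≠ '"' := by subst h1; decide
    simp only [h1, h2, decide_true, decide_false, if_true, if_false, true_or, if_pos]
    cases t.findIdx? (· = '"') <;> simp
  · by_cases h2 : c = '"'
    · simp only [h1, h2, decide_true, decide_false, if_true, if_false, or_true, if_pos]
      cases t.findIdx? (· = '\'') <;> simp
    · simp only [h1, h2, decide_false, if_false, or_self, if_neg, not_false_iff]
      cases ha : t.findIdx? (· = '\'') <;> cases hb : t.findIdx? (· = '"') <;> simp <;> omega

-- uniform one-step unfolding of pvBLoop (valid for [] too, since pvFindQuote [] = none)
theorem pvBLoop_eq (enc : List Char → List Char) (u : List Char) : pvBLoop enc u =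
    match pvFindQuote u with
    | none => u
    | some i =>
      if u.getD i ' ' = '\'' then
        match (u.drop (i + 1)).findIdx? (· = '\'') with
        | none => u.take i ++ '\'' :: u.drop (i + 1)
        | some j => u.take i ++ '\'' :: (u.drop (i + 1)).take j ++
            '\'' :: pvBLoop enc ((u.drop (i + 1)).drop (j + 1))
      else
        u.take i ++ (if (pvBSplitDouble (u.drop (i + 1))).1.contains '$' = false ∧
                        (pvBSplitDouble (u.drop (i + 1))).1 ≠ [] then
            '"' :: enc (pvBSplitDouble (u.drop (i + 1))).1 ++ ['"']
          else '"' :: (pvBSplitDouble (u.drop (i + 1))).1 ++ ['"']) ++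
          pvBLoop enc (pvBSplitDouble (u.drop (i + 1))).2 := by
  cases u with
  | nil =>
      have hn : pvFindQuote [] = none := by simp [pvFindQuote, List.findIdx?_nil]
      simp [pvBLoop, hn]
  | cons c t => rw [pvBLoop]

theorem pvBLoop_cons_other (enc : List Char → List Char) (c : Char) (t : List Char)
    (h1 : c ≠ '\'') (h2 : c ≠ '"') : pvBLoop enc (c :: t) = c :: pvBLoop enc t := by
  rw [pvBLoop_eq enc (c :: t), pvBLoop_eq enc t]
  rw [pvFindQuote_cons]
  simp only [h1, h2, or_self, if_false]
  cases hfq : pvFindQuote t with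
  | none => simp
  | some i =>
      simp only [Option.map_some, List.take_succ_cons, List.drop_succ_cons, List.getD_cons_succ]
      split
      · split <;> simp
      · split <;> simp

theorem pvALoop_true_none (enc : List Char → List Char) (t : List Char)
    (h : ∀ x ∈ t, ¬ x = '\'') : pvALoop enc t true = t := by
  induction t with
  | nil => simp [pvALoop]
  | cons c t ih =>
      have hc : ¬ c = '\'' := h c (by simp)
      have ht : ∀ x ∈ t, ¬ x = '\'' := fun x hx => h x (by simp [hx])
      simp [pvALoop, hc, ih ht]

theorem pvALoop_true_some (enc : List Char → List Char) :
    ∀ (t : List Char) (j : Nat), t.findIdx? (· = '\'') = some j →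
    pvALoop enc t true = t.take j ++ '\'' :: pvALoop enc (t.drop (j + 1)) false := by
  intro t
  induction t with
  | nil => intro j h; simp [List.findIdx?_nil] at h
  | cons c t ih =>
      intro j h
      rw [List.findIdx?_cons] at h
      by_cases hc : c = '\''
      · simp [hc] at h
        subst hc
        cases h
        simp [pvALoop]
      · simp [hc] at h
        obtain ⟨j', hj', rfl⟩ := h
        simp [pvALoop, hc, ih j' hj']

theorem pvMain (enc : List Char → List Char) :
    ∀ (n : Nat) (s : List Char), s.length ≤ n → pvALoop enc s false = pvBLoop enc s := by
  intro n
  induction n with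
  | zero =>
      intro s hs
      have : s = [] := List.eq_nil_of_length_eq_zero (Nat.le_zero.mp hs)
      subst this
      simp [pvALoop, pvBLoop]
  | succ n ih =>
      intro s hs
      cases s with
      | nil => simp [pvALoop, pvBLoop]
      | cons c t =>
          simp only [List.length_cons, Nat.add_le_add_iff_right] at hs
          by_cases hc1 : c = '\''
          · subst hc1
            rw [pvBLoop_eq]
            simp only [pvFindQuote_cons, true_or, if_pos]
            simp only [List.take_zero, List.drop_succ_cons, List.drop_zero, List.getD_cons_zero,
              List.nil_append, if_pos rfl]
            cases hf : t.findIdx? (· = '\'') with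
            | none =>
                have hn : ∀ x ∈ t, ¬ x = '\'' := by
                  have := List.findIdx?_eq_none_iff.mp hf
                  simpa using this
                simp [pvALoop, pvALoop_true_none enc t hn]
            | some j =>
                have hlen : (t.drop (j + 1)).length ≤ n := le_trans (by simp) hs
                simp [pvALoop, pvALoop_true_some enc t j hf, ih _ hlen]
          · by_cases hc2 : c = '"'
            · subst hc2
              rw [pvBLoop_eq]
              simp only [pvFindQuote_cons, or_true, if_pos]
              simp only [List.take_zero, List.drop_succ_cons, List.drop_zero, List.getD_cons_zero,
                List.nil_append]
              have hq : ('"' : Char) ≠ '\'' := by decide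
              simp only [if_neg hq]
              rw [pvBSplitDouble_eq_pvADq]
              have hlen : (pvADq t).2.length ≤ n := le_trans (pvADq_snd_le t) hs
              have hrec := ih _ hlen
              simp [pvALoop, hrec, List.length_pos_iff]
            · rw [pvBLoop_cons_other enc c t hc1 hc2]
              simp [pvALoop, hc1, hc2, ih t hs]

-- ===== VERDICT (by name: the statement is the Claim_ definition above) =====
theorem obfuscate_php_strings_py_spec : Claim_equal_obfuscate_php_strings_py := by
  intro code mode _
  unfold Spec_obfuscate_php_strings_py obfuscate_php_strings_py obfuscate_php_strings_py_alt
  exact congrArg String.mk (pvMain _ code.toList.length code.toList le_rfl)
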